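-- pv_equiv track=rewrite | github.com/MaggieAppleton/squarespace-katie-archiver | src/json_generator.py | _process_links_for_archive
-- ===== SOURCE A (Python) =====
-- from typing import List, Dict, Any, Optional
--
-- def _process_links_for_archive(links: List[Dict[str, Any]]) -> List[Dict[str, Any]]:
--     """Process links for archive format."""
--     # Group links by type
--     link_groups = {
--         "internal": [],
--         "external": [],
--         "email": [],
--         "phone": []
--     }
--
--     for link in links:
--         link_type = link.get('type', 'unknown')
--         processed_link = {
--             "url": link.get('url', ''),
--             "text": link.get('text', ''),
--             "title": link.get('title', '')
--         }
--
--         if link_type in link_groups: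
--             link_groups[link_type].append(processed_link)
--         else:
--             link_groups['external'].append(processed_link)
--
--     return link_groups
-- ===== SOURCE B (Python) =====
-- def _process_links_for_archive(links):
--     """Process links for archive format: normalize to (bucket, payload) pairs, then filter per fixed key."""
--     keys = ["internal", "external", "email", "phone"]
--     pairs = []
--     for link in links:
--         t = link.get('type', 'unknown')
--         pairs.append((t if t in keys else 'external', {
--             "url": link.get('url', ''),
--             "text": link.get('text', ''),
--             "title": link.get('title', ''),
--         }))
--     return {k: [p for (t, p) in pairs if t == k] for k in keys}
-- ===== Notes on version B (the rewrite author's own statement) =====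
-- stated objective: alternative
-- what changed: Replaces the single append-into-mutable-buckets loop by a normalize pass producing (bucket, payload) pairs plus a dict comprehension that filters the pairs once per fixed key.
import Mathlib
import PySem

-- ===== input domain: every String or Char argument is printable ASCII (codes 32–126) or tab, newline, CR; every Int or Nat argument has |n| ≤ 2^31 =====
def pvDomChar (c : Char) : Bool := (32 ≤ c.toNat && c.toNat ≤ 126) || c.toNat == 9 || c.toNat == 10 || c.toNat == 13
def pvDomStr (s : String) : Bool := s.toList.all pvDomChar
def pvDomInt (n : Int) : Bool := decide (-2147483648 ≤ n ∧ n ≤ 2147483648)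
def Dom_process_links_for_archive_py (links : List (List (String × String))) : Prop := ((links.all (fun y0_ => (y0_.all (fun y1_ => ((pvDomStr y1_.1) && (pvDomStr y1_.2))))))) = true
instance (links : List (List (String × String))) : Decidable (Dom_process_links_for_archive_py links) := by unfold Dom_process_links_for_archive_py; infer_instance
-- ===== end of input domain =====

-- B differs from A by decomposition only (normalize-then-filter vs append loop); same complexity.
-- shared primitive: Python's `dict.get(k, dflt)` on a link given as an association list
def pvLinkGet (link : List (String × String)) (k dflt : String) : String :=
  (PySem.Dict.ofList link).getD k dflt

-- ===== PORT A =====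
-- loop body of A (one iteration: compute link_type/processed, append into the matching bucket)
def pvStepA (d : PySem.Dict String (List (List (String × String)))) (link : List (String × String)) :
    PySem.Dict String (List (List (String × String))) :=
  let link_type := pvLinkGet link "type" "unknown"
  let processed := [("url", pvLinkGet link "url" ""), ("text", pvLinkGet link "text" ""),
                    ("title", pvLinkGet link "title" "")]
  if d.contains link_type then d.modify link_type [] (· ++ [processed])
  else d.modify "external" [] (· ++ [processed])

def process_links_for_archive_py (links : List (List (String × String))) : List (String × List (List (String × String))) :=
  let init : PySem.Dict String (List (List (String × String))) :=
    PySem.Dict.ofList [("internal", []), ("external", []), ("email", []), ("phone", [])]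
  (links.foldl pvStepA init).items

-- ===== PORT B =====
def process_links_for_archive_py_alt (links : List (List (String × String))) : List (String × List (List (String × String))) :=
  let keys : List String := ["internal", "external", "email", "phone"]
  let pairs := links.map (fun link =>
    let t := pvLinkGet link "type" "unknown"
    ((if t ∈ keys then t else "external"),
     [("url", pvLinkGet link "url" ""), ("text", pvLinkGet link "text" ""),
      ("title", pvLinkGet link "title" "")]))
  keys.map (fun k => (k, (pairs.filter (fun p => p.1 == k)).map (·.2)))

-- ===== PRECONDITION & SPEC =====
def Spec_process_links_for_archive_py (links : List (List (String × String))) (out : List (String × List (List (String × String)))) : Prop := out = process_links_for_archive_py_alt links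
instance (links : List (List (String × String))) (out : List (String × List (List (String × String)))) : Decidable (Spec_process_links_for_archive_py links out) := by unfold Spec_process_links_for_archive_py; infer_instance

-- ===== CLAIM (what is proved, stated in full; the proofs are below) =====
def Claim_equal_process_links_for_archive_py : Prop := ∀ (links : List (List (String × String))), Dom_process_links_for_archive_py links → Spec_process_links_for_archive_py links (process_links_for_archive_py links)

-- ===== LEMMAS AND PROOFS =====

-- the (bucket, payload) pair B computes for one link
def pvPair (link : List (String × String)) : String × List (String × String) :=
  let t := pvLinkGet link "type" "unknown"
  ((if t ∈ ["internal", "external", "email", "phone"] then t else "external"),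
   [("url", pvLinkGet link "url" ""), ("text", pvLinkGet link "text" ""),
    ("title", pvLinkGet link "title" "")])

def pvBucket (k : String) (links : List (List (String × String))) : List (List (String × String)) :=
  ((links.map pvPair).filter (fun p => p.1 == k)).map (·.2)

-- loop invariant for A's fold, with the four bucket values generalized
theorem pv_loop (links : List (List (String × String))) (a b c e : List (List (String × String))) :
    (links.foldl pvStepA
      (PySem.Dict.mk [("internal", a), ("external", b), ("email", c), ("phone", e)])).items
    = [("internal", a ++ pvBucket "internal" links), ("external", b ++ pvBucket "external" links),
       ("email", c ++ pvBucket "email" links), ("phone", e ++ pvBucket "phone" links)] := by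
  induction links generalizing a b c e with
  | nil => simp [pvBucket]
  | cons link rest ih =>
    have hbkt : ∀ k, pvBucket k (link :: rest) =
        (if (pvPair link).1 == k then [(pvPair link).2] else []) ++ pvBucket k rest := by
      intro k
      simp only [pvBucket, List.map_cons, List.filter_cons]
      split <;> simp_all
    by_cases h1 : pvLinkGet link "type" "unknown" = "internal"
    · have hstep : pvStepA (PySem.Dict.mk [("internal", a), ("external", b), ("email", c), ("phone", e)]) link
          = PySem.Dict.mk [("internal", a ++ [[("url", pvLinkGet link "url" ""), ("text", pvLinkGet link "text" ""), ("title", pvLinkGet link "title" "")]]), ("external", b), ("email", c), ("phone", e)] := by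
        simp [pvStepA, PySem.Dict.contains, PySem.Dict.modify, PySem.Dict.get?, PySem.Dict.getD,
              PySem.Dict.insert, h1]
      rw [List.foldl_cons, hstep, ih]
      simp [hbkt, pvPair, h1]
    · by_cases h2 : pvLinkGet link "type" "unknown" = "external"
      · have hstep : pvStepA (PySem.Dict.mk [("internal", a), ("external", b), ("email", c), ("phone", e)]) link
            = PySem.Dict.mk [("internal", a), ("external", b ++ [[("url", pvLinkGet link "url" ""), ("text", pvLinkGet link "text" ""), ("title", pvLinkGet link "title" "")]]), ("email", c), ("phone", e)] := by
          simp [pvStepA, PySem.Dict.contains, PySem.Dict.modify, PySem.Dict.get?, PySem.Dict.getD,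
                PySem.Dict.insert, h2]
        rw [List.foldl_cons, hstep, ih]
        simp [hbkt, pvPair, Ne.symm h1, h2]
      · by_cases h3 : pvLinkGet link "type" "unknown" = "email"
        · have hstep : pvStepA (PySem.Dict.mk [("internal", a), ("external", b), ("email", c), ("phone", e)]) link
              = PySem.Dict.mk [("internal", a), ("external", b), ("email", c ++ [[("url", pvLinkGet link "url" ""), ("text", pvLinkGet link "text" ""), ("title", pvLinkGet link "title" "")]]), ("phone", e)] := by
            simp [pvStepA, PySem.Dict.contains, PySem.Dict.modify, PySem.Dict.get?, PySem.Dict.getD,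
                  PySem.Dict.insert, h3]
          rw [List.foldl_cons, hstep, ih]
          simp [hbkt, pvPair, Ne.symm h1, Ne.symm h2, h3]
        · by_cases h4 : pvLinkGet link "type" "unknown" = "phone"
          · have hstep : pvStepA (PySem.Dict.mk [("internal", a), ("external", b), ("email", c), ("phone", e)]) link
                = PySem.Dict.mk [("internal", a), ("external", b), ("email", c), ("phone", e ++ [[("url", pvLinkGet link "url" ""), ("text", pvLinkGet link "text" ""), ("title", pvLinkGet link "title" "")]])] := by
              simp [pvStepA, PySem.Dict.contains, PySem.Dict.modify, PySem.Dict.get?, PySem.Dict.getD,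
                    PySem.Dict.insert, h4]
            rw [List.foldl_cons, hstep, ih]
            simp [hbkt, pvPair, Ne.symm h1, Ne.symm h2, Ne.symm h3, h4]
          · have hstep : pvStepA (PySem.Dict.mk [("internal", a), ("external", b), ("email", c), ("phone", e)]) link
                = PySem.Dict.mk [("internal", a), ("external", b ++ [[("url", pvLinkGet link "url" ""), ("text", pvLinkGet link "text" ""), ("title", pvLinkGet link "title" "")]]), ("email", c), ("phone", e)] := by
              simp [pvStepA, PySem.Dict.contains, PySem.Dict.modify, PySem.Dict.get?, PySem.Dict.getD,
                    PySem.Dict.insert, Ne.symm h1, Ne.symm h2, Ne.symm h3, Ne.symm h4]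
            rw [List.foldl_cons, hstep, ih]
            simp [hbkt, pvPair, h1, h2, h3, h4]

-- ===== VERDICT (by name: the statement is the Claim_ definition above) =====
theorem process_links_for_archive_py_spec : Claim_equal_process_links_for_archive_py := by
  intro links _
  show process_links_for_archive_py links = process_links_for_archive_py_alt links
  have hinit : (PySem.Dict.ofList [("internal", ([] : List (List (String × String)))), ("external", []), ("email", []), ("phone", [])])
      = PySem.Dict.mk [("internal", []), ("external", []), ("email", []), ("phone", [])] := by decide
  simp only [process_links_for_archive_py, hinit, pv_loop]
  rfl
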